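-- pv_equiv track=rewrite | github.com/david-dev-code/af3-complex-db | app/local_alphafold_parser/data_extractor.py | _clean_a3m
-- ===== SOURCE A (Python) =====
-- from typing import Any, Dict, List
--
-- def _clean_a3m(text: str) -> List[str]:
--     """Parses and cleans A3M format text by removing lowercase insertion characters."""
--     seqs, buf = [], []
--     for line in text.splitlines():
--         if line.startswith(">"):
--             if buf:
--                 seqs.append("".join(buf));
--                 buf.clear()
--             continue
--         buf.append(line.strip())
--     if buf:
--         seqs.append("".join(buf))
--     return ["".join(c for c in s if not c.islower()) for s in seqs]
-- ===== SOURCE B (Python) =====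
-- def _clean_a3m(text):
--     """Parses and cleans A3M format text by removing lowercase insertion characters."""
--     lines = text.splitlines()
--     out = []
--     i, n = 0, len(lines)
--     while i < n:
--         if lines[i].startswith(">"):
--             i += 1
--             continue
--         j = i
--         while j < n and not lines[j].startswith(">"):
--             j += 1
--         out.append("".join(c for l in lines[i:j] for c in l.strip() if not c.islower()))
--         i = j
--     return out
-- ===== Notes on version B (the rewrite author's own statement) =====
-- stated objective: alternative
-- what changed: Replaced A's buffer/flush state machine over lines by a two-pointer run scan that splits the line list into maximal non-header runs and builds each sequence in one fused strip-and-filter pass, with no intermediate joined string.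
import Mathlib
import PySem

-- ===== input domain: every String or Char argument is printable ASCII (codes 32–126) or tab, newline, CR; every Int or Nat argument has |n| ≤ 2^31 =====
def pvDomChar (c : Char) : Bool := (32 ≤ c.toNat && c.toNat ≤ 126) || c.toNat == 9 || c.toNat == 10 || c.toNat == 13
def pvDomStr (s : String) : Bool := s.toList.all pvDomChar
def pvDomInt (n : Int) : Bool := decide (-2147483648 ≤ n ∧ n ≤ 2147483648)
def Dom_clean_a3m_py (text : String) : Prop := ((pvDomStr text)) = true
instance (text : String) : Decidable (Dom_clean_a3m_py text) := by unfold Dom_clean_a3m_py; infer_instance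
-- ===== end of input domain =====

-- B replaces A's buffer/flush state machine by a two-pointer run scan over the line list
-- (each maximal run of non-header lines becomes one sequence, stripped and lowercase-filtered
-- in a single fused pass); objective: alternative decomposition, same asymptotic cost.

-- ===== PORT A =====
-- "".join(c for c in s if not c.islower())
def pvFilt (s : String) : String :=
  String.mk (s.toList.filter (fun c => ! PySem.Chars.islower c))

-- one step of A's loop over the lines: state = (seqs, buf)
def pvStepA (st : List String × List String) (line : String) : List String × List String :=
  if PySem.Str.startswith line ">" then
    if st.2 ≠ [] then (st.1 ++ [PySem.Str.join "" st.2], []) else st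
  else
    (st.1, st.2 ++ [PySem.Str.strip line])

def clean_a3m_py (text : String) : List String :=
  let st := (PySem.Str.splitlines text).foldl pvStepA ([], [])
  let seqs := if st.2 ≠ [] then st.1 ++ [PySem.Str.join "" st.2] else st.1
  seqs.map pvFilt

-- ===== PORT B =====
def pvIsHdr (l : String) : Bool := PySem.Str.startswith l ">"

-- "".join(c for l in run for c in l.strip() if not c.islower())
def pvSeqB (run : List String) : String :=
  String.mk (run.flatMap (fun l => (PySem.Chars.strip l.toList).filter (fun c => ! PySem.Chars.islower c)))

-- the two inner while-loops of Source B are the takeWhile/dropWhile split of the remaining lines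
def pvGoB : List String → List String
  | [] => []
  | l :: rest =>
    if pvIsHdr l then pvGoB rest
    else
      pvSeqB ((l :: rest).takeWhile (fun x => ! pvIsHdr x)) ::
        pvGoB ((l :: rest).dropWhile (fun x => ! pvIsHdr x))
termination_by ls => ls.length
decreasing_by
  · simp
  · simp only [List.dropWhile_cons]
    simp_all only [Bool.not_false, if_true, List.length_cons]
    exact Nat.lt_succ_of_le (List.length_dropWhile_le _ _)

def clean_a3m_py_alt (text : String) : List String :=
  pvGoB (PySem.Str.splitlines text)

-- ===== PRECONDITION & SPEC =====
def Spec_clean_a3m_py (text : String) (out : List String) : Prop := out = clean_a3m_py_alt text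
instance (text : String) (out : List String) : Decidable (Spec_clean_a3m_py text out) := by unfold Spec_clean_a3m_py; infer_instance

-- ===== CLAIM (what is proved, stated in full; the proofs are below) =====
def Claim_equal_clean_a3m_py : Prop := ∀ (text : String), Dom_clean_a3m_py text → Spec_clean_a3m_py text (clean_a3m_py text)

-- ===== LEMMAS AND PROOFS =====

-- A's final flush, as a function of the loop state
def pvFinA (st : List String × List String) : List String :=
  if st.2 ≠ [] then st.1 ++ [PySem.Str.join "" st.2] else st.1

theorem pvJoin_nil_eq_flatten (ps : List (List Char)) :
    PySem.Chars.join [] ps = ps.flatten := by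
  match ps with
  | [] => simp [PySem.Chars.join_nil]
  | [p] => simp [PySem.Chars.join_singleton]
  | p :: q :: rest =>
    rw [PySem.Chars.join_cons_cons, pvJoin_nil_eq_flatten (q :: rest)]
    simp

-- per-run: A's (join the stripped lines, then filter) = B's fused pass
theorem pvRun_eq (run : List String) :
    pvFilt (PySem.Str.join "" (run.map PySem.Str.strip)) = pvSeqB run := by
  unfold pvFilt pvSeqB
  apply congrArg String.mk
  rw [PySem.Str.toList_join]
  simp only [List.map_map]
  have h : (run.map (String.toList ∘ PySem.Str.strip)) =
      run.map (fun l => PySem.Chars.strip l.toList) := by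
    apply List.map_congr_left; intro l _; simp [PySem.Str.toList_strip]
  rw [show ("" : String).toList = [] from rfl, h, pvJoin_nil_eq_flatten,
    List.filter_flatten, List.flatMap_def, List.map_map]
  simp [Function.comp_def]

-- the accumulator of A's fold is only appended to
theorem pvFoldA_acc (ls : List String) (acc buf : List String) :
    ls.foldl pvStepA (acc, buf) =
      (acc ++ (ls.foldl pvStepA ([], buf)).1, (ls.foldl pvStepA ([], buf)).2) := by
  induction ls generalizing acc buf with
  | nil => simp
  | cons l rest ih =>
    simp only [List.foldl_cons]
    by_cases hh : PySem.Str.startswith l ">"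
    · by_cases hb : buf = []
      · subst hb
        simp only [pvStepA, hh, if_true, ne_eq, not_true_eq_false, if_false]
        exact ih acc []
      · simp only [pvStepA, hh, if_true, hb, ne_eq, not_false_eq_true, List.nil_append]
        rw [ih (acc ++ [PySem.Str.join "" buf]) [], ih [PySem.Str.join "" buf] []]
        simp
    · simp only [pvStepA, hh, Bool.false_eq_true, if_false]
      rw [ih acc (buf ++ [PySem.Str.strip l]), ih [] (buf ++ [PySem.Str.strip l])]
  -- note: the `hh` rewriting above relies on pvStepA's if-condition being `startswith l ">"`

-- main invariant: A's loop with pending buffer vs B's run scan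
theorem pvInv (ls : List String) (buf : List String) :
    (pvFinA (ls.foldl pvStepA ([], buf))).map pvFilt =
      (if buf ≠ [] then
        pvFilt (PySem.Str.join "" (buf ++ (ls.takeWhile (fun x => ! pvIsHdr x)).map PySem.Str.strip)) ::
          pvGoB (ls.dropWhile (fun x => ! pvIsHdr x))
      else pvGoB ls) := by
  induction ls generalizing buf with
  | nil =>
    by_cases hb : buf = []
    · subst hb; simp [pvFinA, pvGoB]
    · simp [pvFinA, pvGoB, hb]
  | cons l rest ih =>
    by_cases hh : pvIsHdr l
    · -- header line
      have hh' : PySem.Str.startswith l ">" = true := hh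
      have hg : pvGoB (l :: rest) = pvGoB rest := by rw [pvGoB]; simp [hh]
      have htw : (l :: rest).takeWhile (fun x => ! pvIsHdr x) = [] := by
        simp [hh]
      have hdw : (l :: rest).dropWhile (fun x => ! pvIsHdr x) = l :: rest := by
        simp [hh]
      by_cases hb : buf = []
      · subst hb
        have hstep : pvStepA ([], []) l = ([], []) := by
          unfold pvStepA; rw [hh']; simp
        simp only [List.foldl_cons, hstep]
        have ihr := ih []
        simp only [ne_eq, not_true_eq_false, if_false] at ihr
        simp only [ne_eq, not_true_eq_false, if_false, hg]
        exact ihr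
      · have hstep : pvStepA ([], buf) l = ([PySem.Str.join "" buf], []) := by
          unfold pvStepA; rw [hh']; simp [hb]
        simp only [List.foldl_cons, hstep]
        rw [pvFoldA_acc rest [PySem.Str.join "" buf] []]
        have hfa : pvFinA ([PySem.Str.join "" buf] ++ (rest.foldl pvStepA ([], [])).1,
            (rest.foldl pvStepA ([], [])).2)
            = [PySem.Str.join "" buf] ++ pvFinA (rest.foldl pvStepA ([], [])) := by
          unfold pvFinA
          by_cases h2 : (rest.foldl pvStepA ([], [])).2 = [] <;> simp [h2]
        rw [hfa]
        have ihr := ih []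
        simp only [ne_eq, not_true_eq_false, if_false] at ihr
        simp only [List.map_append, List.map_cons, List.map_nil, ihr]
        rw [htw, hdw]
        simp [hb, hg]
    · -- non-header line
      have hh' : PySem.Str.startswith l ">" = false := by
        unfold pvIsHdr at hh
        exact Bool.eq_false_iff.mpr hh
      have htw : (l :: rest).takeWhile (fun x => ! pvIsHdr x)
          = l :: rest.takeWhile (fun x => ! pvIsHdr x) := by
        simp [hh]
      have hdw : (l :: rest).dropWhile (fun x => ! pvIsHdr x)
          = rest.dropWhile (fun x => ! pvIsHdr x) := by
        simp [hh]
      have hg : pvGoB (l :: rest) =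
          pvSeqB (l :: rest.takeWhile (fun x => ! pvIsHdr x)) ::
            pvGoB (rest.dropWhile (fun x => ! pvIsHdr x)) := by
        rw [pvGoB]
        simp only [hh, Bool.false_eq_true, if_false, htw, hdw]
      have hstep : pvStepA ([], buf) l = ([], buf ++ [PySem.Str.strip l]) := by
        unfold pvStepA; rw [hh']; simp
      simp only [List.foldl_cons, hstep]
      rw [ih (buf ++ [PySem.Str.strip l])]
      simp only [ne_eq, List.append_eq_nil_iff, List.cons_ne_self, and_false,
        not_false_eq_true, if_true, List.append_assoc, List.cons_append, List.nil_append]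
      by_cases hb : buf = []
      · subst hb
        simp only [not_true_eq_false, if_false, List.nil_append, hg, htw, hdw]
        rw [← pvRun_eq]
        simp
      · simp [hb, htw, hdw]

-- ===== VERDICT (by name: the statement is the Claim_ definition above) =====
theorem clean_a3m_py_spec : Claim_equal_clean_a3m_py := by
  intro text _
  unfold Spec_clean_a3m_py clean_a3m_py clean_a3m_py_alt
  have h := pvInv (PySem.Str.splitlines text) []
  simp only [ne_eq, not_true_eq_false, if_false] at h
  exact h
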